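-- pv_equiv track=rewrite | github.com/hamzaelouiaazzani/vehicle_counting_CV | counting/count.py | id_to_first_last_frame
-- ===== SOURCE A (Python) =====
-- def id_to_first_last_frame(ids_frames):
--     id_to_first_last = {}
--
--     for id_, value in ids_frames:
--         id_ = int(id_)
--         value = int(value)
--
--         if id_ not in id_to_first_last:
--             id_to_first_last[id_] = {'first_frame': value, 'last_frame': value}
--         else:
--             id_to_first_last[id_]['first_frame'] = min(id_to_first_last[id_]['first_frame'], value)
--             id_to_first_last[id_]['last_frame'] = max(id_to_first_last[id_]['last_frame'], value)
--
--     return id_to_first_last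
-- ===== SOURCE B (Python) =====
-- def id_to_first_last_frame(ids_frames):
--     groups = {}
--     for id_, value in ids_frames:
--         id_, value = int(id_), int(value)
--         groups[id_] = groups.get(id_, []) + [value]
--     return {id_: {'first_frame': min(vals), 'last_frame': max(vals)}
--             for id_, vals in groups.items()}
-- ===== Notes on version B (the rewrite author's own statement) =====
-- stated objective: alternative
-- what changed: B first groups all frame values per id into lists in one pass (preserving first-appearance order) and then computes each id's min/max in a second pass, instead of maintaining running first/last values in a nested dict during a single pass.
import Mathlib
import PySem

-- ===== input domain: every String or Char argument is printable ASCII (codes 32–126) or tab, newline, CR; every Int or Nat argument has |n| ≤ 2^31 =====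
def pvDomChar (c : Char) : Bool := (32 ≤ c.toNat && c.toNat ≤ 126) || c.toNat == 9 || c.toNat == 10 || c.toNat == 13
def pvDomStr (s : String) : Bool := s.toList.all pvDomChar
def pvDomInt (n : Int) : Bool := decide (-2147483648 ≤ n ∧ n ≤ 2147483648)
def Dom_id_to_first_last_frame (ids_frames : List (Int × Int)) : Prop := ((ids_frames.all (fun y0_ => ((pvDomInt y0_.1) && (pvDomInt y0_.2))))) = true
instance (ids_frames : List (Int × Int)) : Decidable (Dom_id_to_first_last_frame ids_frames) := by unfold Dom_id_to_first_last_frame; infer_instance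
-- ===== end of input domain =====

-- B groups all frame values per id in one pass, then takes min/max per group in a second pass,
-- instead of A's running min/max in a nested dict (alternative decomposition, same asymptotic cost).


-- ===== PORT A =====
-- one loop iteration of A: new ids get {'first_frame': v, 'last_frame': v}, known ids have
-- their entries updated in place with min/max (dict value overwrite keeps position)
def stepA (d : PySem.Dict Int (PySem.Dict String Int)) (p : Int × Int) :
    PySem.Dict Int (PySem.Dict String Int) :=
  if d.contains p.1 = false then
    d.insert p.1 ((PySem.Dict.empty.insert "first_frame" p.2).insert "last_frame" p.2)
  else
    let inner := d.getD p.1 PySem.Dict.empty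
    let inner := inner.insert "first_frame" (min (inner.getD "first_frame" 0) p.2)
    let inner := inner.insert "last_frame" (max (inner.getD "last_frame" 0) p.2)
    d.insert p.1 inner

def id_to_first_last_frame (ids_frames : List (Int × Int)) : List (Int × List (String × Int)) :=
  ((ids_frames.foldl stepA PySem.Dict.empty).items).map (fun p => (p.1, p.2.items))

-- ===== PORT B =====
-- groups[id_] = groups.get(id_, []) + [value]  is exactly Dict.modify
def stepB (g : PySem.Dict Int (List Int)) (p : Int × Int) : PySem.Dict Int (List Int) :=
  g.modify p.1 [] (fun vs => vs ++ [p.2])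

def id_to_first_last_frame_alt (ids_frames : List (Int × Int)) : List (Int × List (String × Int)) :=
  (ids_frames.foldl stepB PySem.Dict.empty).items.map (fun p =>
    (p.1, [("first_frame", (PySem.List.min? p.2 id).getD 0),
           ("last_frame", (PySem.List.max? p.2 id).getD 0)]))

-- ===== PRECONDITION & SPEC =====
def Spec_id_to_first_last_frame (ids_frames : List (Int × Int)) (out : List (Int × List (String × Int))) : Prop := out = id_to_first_last_frame_alt ids_frames
instance (ids_frames : List (Int × Int)) (out : List (Int × List (String × Int))) : Decidable (Spec_id_to_first_last_frame ids_frames out) := by unfold Spec_id_to_first_last_frame; infer_instance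

-- ===== CLAIM (what is proved, stated in full; the proofs are below) =====
def Claim_equal_id_to_first_last_frame : Prop := ∀ (ids_frames : List (Int × Int)), Dom_id_to_first_last_frame ids_frames → Spec_id_to_first_last_frame ids_frames (id_to_first_last_frame ids_frames)

-- ===== LEMMAS AND PROOFS =====

-- the inner dict A keeps for an id always has this exact shape
def mkInner (a b : Int) : PySem.Dict String Int :=
  (PySem.Dict.empty.insert "first_frame" a).insert "last_frame" b

-- the frame values recorded for id k in the input list
def valsOf (l : List (Int × Int)) (k : Int) : List Int :=
  (l.filter (fun p => p.1 == k)).map (fun p => p.2)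

lemma mkInner_items (a b : Int) : (mkInner a b).items = [("first_frame", a), ("last_frame", b)] := rfl

lemma mkInner_getD_first (a b : Int) : (mkInner a b).getD "first_frame" 0 = a := rfl
lemma mkInner_getD_last (a b : Int) : (mkInner a b).getD "last_frame" 0 = b := rfl

lemma mkInner_insert_first (a b x : Int) : (mkInner a b).insert "first_frame" x = mkInner x b := rfl
lemma mkInner_insert_last (a b y : Int) : (mkInner a b).insert "last_frame" y = mkInner a y := rfl

lemma valsOf_append (l : List (Int × Int)) (p : Int × Int) (k : Int) :
    valsOf (l ++ [p]) k = valsOf l k ++ (if p.1 == k then [p.2] else []) := by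
  simp only [valsOf, List.filter_append, List.map_append]
  by_cases h : p.1 == k <;> simp [List.filter, h]

lemma min?_go (t : List Int) (m : Int) :
    PySem.List.min? (m :: t) id = some (t.foldl min m) := by
  induction t generalizing m with
  | nil => rfl
  | cons h t ih =>
      have key : PySem.List.min? (m :: h :: t) id = PySem.List.min? (min m h :: t) id := by
        simp only [PySem.List.min?, List.foldl_cons, id]
        by_cases hlt : h < m
        · simp [hlt, min_eq_right hlt.le]
        · simp [hlt, min_eq_left (le_of_not_gt hlt)]
      rw [key, ih]
      simp [List.foldl_cons]

lemma max?_go (t : List Int) (m : Int) :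
    PySem.List.max? (m :: t) id = some (t.foldl max m) := by
  induction t generalizing m with
  | nil => rfl
  | cons h t ih =>
      have key : PySem.List.max? (m :: h :: t) id = PySem.List.max? (max m h :: t) id := by
        simp only [PySem.List.max?, List.foldl_cons, id]
        by_cases hlt : m < h
        · simp [hlt, max_eq_right hlt.le]
        · simp [hlt, max_eq_left (le_of_not_gt hlt)]
      rw [key, ih]
      simp [List.foldl_cons]

-- A's dict after the whole loop, per key: min/max of the recorded values
lemma foldA_get? (l : List (Int × Int)) (k : Int) :
    (l.foldl stepA PySem.Dict.empty).get? k =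
      match valsOf l k with
      | [] => none
      | h :: t => some (mkInner (t.foldl min h) (t.foldl max h)) := by
  induction l using List.reverseRecOn generalizing k with
  | nil => simp [valsOf, PySem.Dict.get?_empty]
  | append_singleton l p ih =>
      have hstep : List.foldl stepA PySem.Dict.empty (l ++ [p])
          = stepA (l.foldl stepA PySem.Dict.empty) p := by
        rw [List.foldl_append]; rfl
      set d := l.foldl stepA PySem.Dict.empty with hd
      rw [hstep, valsOf_append]
      rcases hv : valsOf l p.1 with _ | ⟨h, t⟩
      · have hc : d.contains p.1 = false := by
          rw [PySem.Dict.contains_eq_isSome_get?, ih p.1, hv]; rfl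
        have hs : stepA d p = d.insert p.1 (mkInner p.2 p.2) := by
          unfold stepA; rw [hc]; rfl
        rw [hs, PySem.Dict.get?_insert]
        by_cases hk : k = p.1
        · subst hk
          rw [if_pos rfl, hv]
          simp
        · rw [if_neg hk, ih k]
          have hne : (p.1 == k) = false := by simp [Ne.symm hk]
          simp [hne]
      · have hc : d.contains p.1 = true := by
          rw [PySem.Dict.contains_eq_isSome_get?, ih p.1, hv]; rfl
        have hgd : d.getD p.1 PySem.Dict.empty = mkInner (t.foldl min h) (t.foldl max h) := by
          apply PySem.Dict.getD_of_get?_eq_some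
          rw [ih p.1, hv]
        have hs : stepA d p
            = d.insert p.1 (mkInner (min (t.foldl min h) p.2) (max (t.foldl max h) p.2)) := by
          unfold stepA
          rw [hc, if_neg (by simp)]
          simp only [hgd, mkInner_getD_first, mkInner_insert_first, mkInner_getD_last,
            mkInner_insert_last]
        rw [hs, PySem.Dict.get?_insert]
        by_cases hk : k = p.1
        · subst hk
          rw [if_pos rfl, hv]
          simp [List.foldl_append]
        · rw [if_neg hk, ih k]
          have hne : (p.1 == k) = false := by simp [Ne.symm hk]
          simp [hne]

-- A's and B's dicts list their keys in the same order
lemma foldA_keys_eq (l : List (Int × Int)) :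
    (l.foldl stepA PySem.Dict.empty).keys = (l.foldl stepB PySem.Dict.empty).keys := by
  induction l using List.reverseRecOn with
  | nil => rfl
  | append_singleton l p ih =>
      have hstepA : List.foldl stepA PySem.Dict.empty (l ++ [p])
          = stepA (l.foldl stepA PySem.Dict.empty) p := by
        rw [List.foldl_append]; rfl
      have hstepB : List.foldl stepB PySem.Dict.empty (l ++ [p])
          = stepB (l.foldl stepB PySem.Dict.empty) p := by
        rw [List.foldl_append]; rfl
      rw [hstepA, hstepB]
      set dA := l.foldl stepA PySem.Dict.empty with hdA
      set dB := l.foldl stepB PySem.Dict.empty with hdB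
      have hcon : dA.contains p.1 = dB.contains p.1 := by
        rw [PySem.Dict.contains_eq_decide_mem_keys, PySem.Dict.contains_eq_decide_mem_keys, ih]
      by_cases hm : dB.contains p.1 = true
      · have hmA : dA.contains p.1 = true := by rw [hcon]; exact hm
        have hB : (stepB dB p).keys = dB.keys := by
          rw [stepB, PySem.Dict.keys_modify, PySem.Dict.keys_insert_of_contains _ _ hm]
        have hA : (stepA dA p).keys = dA.keys := by
          unfold stepA
          rw [hmA, if_neg (by simp)]
          exact PySem.Dict.keys_insert_of_contains _ _ hmA
        rw [hA, hB, ih]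
      · have hm' : dB.contains p.1 = false := by simpa using hm
        have hmA : dA.contains p.1 = false := by rw [hcon]; exact hm'
        have hB : (stepB dB p).keys = dB.keys ++ [p.1] := by
          rw [stepB, PySem.Dict.keys_modify, PySem.Dict.keys_insert_of_not_contains _ _ hm']
        have hA : (stepA dA p).keys = dA.keys ++ [p.1] := by
          unfold stepA
          rw [hmA, if_pos rfl]
          exact PySem.Dict.keys_insert_of_not_contains _ _ hmA
        rw [hA, hB, ih]

lemma foldB_getD (l : List (Int × Int)) (k : Int) :
    (l.foldl stepB PySem.Dict.empty).getD k [] = valsOf l k := by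
  simpa [stepB, valsOf] using
    PySem.Dict.getD_foldl_modify_append l (PySem.Dict.empty) k

lemma foldB_nodup_keys (l : List (Int × Int)) :
    (l.foldl stepB PySem.Dict.empty).keys.Nodup := by
  simpa [stepB] using
    PySem.Dict.nodup_keys_foldl_modify_key l (fun p => p.1) [] (fun _ p vs => vs ++ [p.2])
      PySem.Dict.empty (by simp)

-- ===== VERDICT (by name: the statement is the Claim_ definition above) =====
lemma nodup_keys_A (l : List (Int × Int)) :
    (l.foldl stepA PySem.Dict.empty).keys.Nodup := by
  rw [foldA_keys_eq]; exact foldB_nodup_keys l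

theorem id_to_first_last_frame_spec : Claim_equal_id_to_first_last_frame := by
  intro l _
  unfold Spec_id_to_first_last_frame
  unfold id_to_first_last_frame id_to_first_last_frame_alt
  rw [PySem.Dict.items_eq_map_keys _ (nodup_keys_A l) PySem.Dict.empty,
      PySem.Dict.items_eq_map_keys _ (foldB_nodup_keys l) []]
  rw [List.map_map, List.map_map, foldA_keys_eq]
  apply List.map_congr_left
  intro k hk
  have hcA : (l.foldl stepA PySem.Dict.empty).contains k = true := by
    rw [PySem.Dict.contains_eq_decide_mem_keys, foldA_keys_eq]; simpa using hk
  rcases hv : valsOf l k with _ | ⟨h, t⟩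
  · exfalso
    rw [PySem.Dict.contains_eq_isSome_get?, foldA_get? l k, hv] at hcA
    simp at hcA
  · have hgA : (l.foldl stepA PySem.Dict.empty).getD k PySem.Dict.empty
        = mkInner (t.foldl min h) (t.foldl max h) := by
      apply PySem.Dict.getD_of_get?_eq_some
      rw [foldA_get? l k, hv]
    have hgB : (l.foldl stepB PySem.Dict.empty).getD k [] = h :: t := by
      rw [foldB_getD, hv]
    simp only [Function.comp, hgA, hgB, mkInner_items, min?_go, max?_go, Option.getD_some]
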